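-- pv_equiv track=rewrite | github.com/reayd-falmouth/pybg | src/asciigammon/gnubg/read_bearoff_move.py | calculate_two_sided_bearoff_index
-- ===== SOURCE A (Python) =====
-- from math import comb
--
-- def calculate_two_sided_bearoff_index(my_checkers, opp_checkers, points):
--     """
--     Compute two-sided bearoff index using proper lexicographical mapping.
--
--     Parameters:
--         my_checkers (int): Number of checkers for the player.
--         opp_checkers (int): Number of checkers for the opponent.
--         points (int): Total bearoff points.
--
--     Returns:
--         int: The two-sided bearoff index.
--     """
--     total_positions = comb(points + 15, 15)
--
--     if my_checkers + opp_checkers < total_positions: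
--         return (my_checkers + opp_checkers) * (
--             my_checkers + opp_checkers + 1
--         ) // 2 + opp_checkers
--     else:
--         return (
--             total_positions**2
--             - calculate_two_sided_bearoff_index(
--                 points - 1 - my_checkers, points - 1 - opp_checkers, points - 1
--             )
--             - 1
--         )
-- ===== SOURCE B (Python) =====
-- from math import comb
--
-- def calculate_two_sided_bearoff_index(my_checkers, opp_checkers, points):
--     # Iterative peel-and-fold: collect each level's total_positions on a stack,
--     # compute the base value, then fold the stack back in reverse.
--     m, o, p = my_checkers, opp_checkers, points
--     stack = []
--     while True:
--         total = comb(p + 15, 15)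
--         if m + o < total:
--             result = (m + o) * (m + o + 1) // 2 + o
--             break
--         stack.append(total)
--         m, o, p = p - 1 - m, p - 1 - o, p - 1
--     for total in reversed(stack):
--         result = total * total - result - 1
--     return result
-- ===== Notes on version B (the rewrite author's own statement) =====
-- stated objective: alternative
-- what changed: Replaces A's recursion with an explicit iterative loop that peels levels while pushing each level's total_positions onto a stack, then folds the stack back in reverse to build the index.
import Mathlib
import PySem

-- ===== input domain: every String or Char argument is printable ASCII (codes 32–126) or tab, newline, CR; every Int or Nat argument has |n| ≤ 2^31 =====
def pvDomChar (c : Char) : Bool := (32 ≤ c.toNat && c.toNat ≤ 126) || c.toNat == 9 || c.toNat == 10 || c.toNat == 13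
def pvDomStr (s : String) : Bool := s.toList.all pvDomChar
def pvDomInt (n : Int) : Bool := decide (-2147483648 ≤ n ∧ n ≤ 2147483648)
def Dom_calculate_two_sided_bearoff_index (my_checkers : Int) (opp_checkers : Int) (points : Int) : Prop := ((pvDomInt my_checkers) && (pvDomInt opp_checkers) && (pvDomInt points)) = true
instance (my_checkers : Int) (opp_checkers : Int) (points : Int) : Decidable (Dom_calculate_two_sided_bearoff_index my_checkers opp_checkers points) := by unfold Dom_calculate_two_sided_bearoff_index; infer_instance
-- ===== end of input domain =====

-- B replaces A's recursion with an explicit loop pushing each level's total on a stack,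
-- then folds the stack back in reverse (objective: alternative decomposition, same cost).

-- ===== PORT A =====
-- math.comb(p + 15, 15); exact for p ≥ -15 (Python raises ValueError for p < -15,
-- those inputs are excluded by Pre_).
def pvComb15 (p : Int) : Int := ((p + 15).toNat.choose 15 : Int)

def calculate_two_sided_bearoff_index (my_checkers : Int) (opp_checkers : Int) (points : Int) : Int :=
  if points < -15 then 0  -- Python: comb raises ValueError here; outside Pre_ (guard only for totality)
  else
    let total := pvComb15 points
    if my_checkers + opp_checkers < total then
      PySem.Int.floordiv ((my_checkers + opp_checkers) * (my_checkers + opp_checkers + 1)) 2 + opp_checkers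
    else
      total ^ 2 - calculate_two_sided_bearoff_index (points - 1 - my_checkers) (points - 1 - opp_checkers) (points - 1) - 1
termination_by (points + 16).toNat
decreasing_by omega

-- ===== PORT B =====
-- the while-loop of Source B: returns (base result, stack of totals in push order)
def pvAltLoop (m : Int) (o : Int) (p : Int) (stack : List Int) : Int × List Int :=
  if p < -15 then (0, stack)  -- Python: comb raises ValueError here; outside Pre_ (guard only for totality)
  else
    let total := pvComb15 p
    if m + o < total then
      (PySem.Int.floordiv ((m + o) * (m + o + 1)) 2 + o, stack)
    else
      pvAltLoop (p - 1 - m) (p - 1 - o) (p - 1) (stack ++ [total])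
termination_by (p + 16).toNat
decreasing_by omega

def calculate_two_sided_bearoff_index_alt (my_checkers : Int) (opp_checkers : Int) (points : Int) : Int :=
  let rs := pvAltLoop my_checkers opp_checkers points []
  rs.2.reverse.foldl (fun r t => t * t - r - 1) rs.1

-- ===== PRECONDITION & SPEC =====
-- Pre_ excludes exactly the inputs on which Python's A raises ValueError (comb with a
-- negative first argument): points ≤ -16, or points = -15 with my+opp ≥ 0 (which recurses
-- straight to points = -16). B raises there too (identical comb-call sequence).
def Pre_calculate_two_sided_bearoff_index (my_checkers : Int) (opp_checkers : Int) (points : Int) : Prop :=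
  -14 ≤ points ∨ (points = -15 ∧ my_checkers + opp_checkers < 0)
instance (my_checkers : Int) (opp_checkers : Int) (points : Int) : Decidable (Pre_calculate_two_sided_bearoff_index my_checkers opp_checkers points) := by unfold Pre_calculate_two_sided_bearoff_index; infer_instance

def pvWitness_calculate_two_sided_bearoff_index : Int × Int × Int := (2, 3, 6)

def Spec_calculate_two_sided_bearoff_index (my_checkers : Int) (opp_checkers : Int) (points : Int) (out : Int) : Prop := out = calculate_two_sided_bearoff_index_alt my_checkers opp_checkers points
instance (my_checkers : Int) (opp_checkers : Int) (points : Int) (out : Int) : Decidable (Spec_calculate_two_sided_bearoff_index my_checkers opp_checkers points out) := by unfold Spec_calculate_two_sided_bearoff_index; infer_instance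

-- ===== CLAIM (what is proved, stated in full; the proofs are below) =====
def Claim_equal_calculate_two_sided_bearoff_index : Prop := ∀ (my_checkers : Int) (opp_checkers : Int) (points : Int), Dom_calculate_two_sided_bearoff_index my_checkers opp_checkers points → Pre_calculate_two_sided_bearoff_index my_checkers opp_checkers points → Spec_calculate_two_sided_bearoff_index my_checkers opp_checkers points (calculate_two_sided_bearoff_index my_checkers opp_checkers points)

-- ===== LEMMAS AND PROOFS =====

-- the loop only ever appends to its accumulator
lemma pvAltLoop_acc (n : Nat) (m o p : Int) (hn : (p + 16).toNat ≤ n) (acc : List Int) :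
    pvAltLoop m o p acc = ((pvAltLoop m o p []).1, acc ++ (pvAltLoop m o p []).2) := by
  induction n generalizing m o p acc with
  | zero =>
      have hp : p < -15 := by omega
      rw [pvAltLoop, pvAltLoop]
      simp [hp]
  | succ n ih =>
      rw [pvAltLoop, pvAltLoop]
      by_cases h1 : p < -15
      · simp [h1]
      · simp only [if_neg h1]
        by_cases h2 : m + o < pvComb15 p
        · simp [h2]
        · simp only [if_neg h2]
          have hrec : (p - 1 + 16).toNat ≤ n := by omega
          rw [ih _ _ _ hrec (acc ++ [pvComb15 p])]
          simp only [List.nil_append]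
          rw [ih _ _ _ hrec [pvComb15 p]]
          simp

lemma pvMain (n : Nat) (m o p : Int) (hn : (p + 16).toNat ≤ n)
    (hpre : Pre_calculate_two_sided_bearoff_index m o p) :
    calculate_two_sided_bearoff_index m o p = calculate_two_sided_bearoff_index_alt m o p := by
  induction n generalizing m o p with
  | zero =>
      exfalso
      rcases hpre with h | h <;> omega
  | succ n ih =>
      have hp15 : ¬ p < -15 := by rcases hpre with h | h <;> omega
      rw [calculate_two_sided_bearoff_index]
      unfold calculate_two_sided_bearoff_index_alt
      rw [pvAltLoop]
      simp only [hp15, if_false]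
      by_cases hbase : m + o < pvComb15 p
      · simp [hbase]
      · -- recursive case: p = -15 is impossible (then pvComb15 p = 0 and m+o < 0)
        have hc15 : pvComb15 (-15) = 0 := by decide
        have hp14 : -14 ≤ p := by
          rcases hpre with h | h
          · exact h
          · exfalso; rw [h.1, hc15] at hbase; omega
        have hpre' : Pre_calculate_two_sided_bearoff_index (p - 1 - m) (p - 1 - o) (p - 1) := by
          by_cases h13 : -13 ≤ p
          · left; omega
          · -- p = -14: pvComb15 (-14) = 0, so m + o ≥ 0 and the new sum is negative
            have hp14' : p = -14 := by omega
            have hc14 : pvComb15 (-14) = 0 := by decide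
            right
            constructor
            · omega
            · rw [hp14'] at hbase ⊢; rw [hc14] at hbase; omega
        have hrec : (p - 1 + 16).toNat ≤ n := by omega
        have hIH := ih _ _ _ hrec hpre'
        simp only [hbase, if_false, List.nil_append]
        rw [pvAltLoop_acc n _ _ _ hrec [pvComb15 p]]
        simp only [List.reverse_append, List.reverse_cons, List.reverse_nil, List.nil_append,
          List.foldl_append, List.foldl_cons, List.foldl_nil]
        rw [hIH]
        unfold calculate_two_sided_bearoff_index_alt
        ring

-- ===== VERDICT (by name: the statement is the Claim_ definition above) =====
theorem calculate_two_sided_bearoff_index_spec : Claim_equal_calculate_two_sided_bearoff_index := by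
  intro m o p _ hpre
  unfold Spec_calculate_two_sided_bearoff_index
  exact pvMain (p + 16).toNat m o p le_rfl hpre
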